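-- pv_equiv track=rewrite | github.com/tytusdb/tytusdb | parser/team28/models/instructions/Expression/expression.py | method_for_timestamp
-- ===== SOURCE A (Python) =====
-- def method_for_timestamp(fecha):
--     data_time = ""
--     list_data_time = []
--     for index, data in enumerate(fecha):
--         if data == '\t' or data == '\r' or data == '\b' or data == '\f' or data == ' ':
--             pass
--         elif data != '-' and not (data == ':'):
--             data_time += data
--             if len(data_time) == 4:
--                 list_data_time.append(int(data_time))
--                 data_time = ""
--             elif len(data_time) == 2 and len(list_data_time) != 0:
--                 list_data_time.append(int(data_time))
--                 data_time = ""
--         elif data != ':' and not (data == "-"):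
--             data_time += data
--             if len(data_time) == 2 and len(list_data_time) != 0:
--                 list_data_time.append(int(data_time))
--                 data_time = ""
--     return list_data_time
-- ===== SOURCE B (Python) =====
-- def method_for_timestamp(fecha):
--     # filter-then-chunk: drop separators, take a 4-char first field, then 2-char fields
--     kept = [c for c in fecha if c not in '\t\r\b\f -:']
--     if len(kept) < 4:
--         return []
--     out = [int(''.join(kept[:4]))]
--     for i in range(4, len(kept) - 1, 2):
--         out.append(int(''.join(kept[i:i + 2])))
--     return out
-- ===== Notes on version B (the rewrite author's own statement) =====
-- stated objective: simpler
-- what changed: Replaces A's char-by-char accumulator state machine (with an unreachable third branch) by a filter pass that drops separator characters followed by fixed-shape chunking: one 4-char field then successive 2-char fields, dropping a trailing single char. Pre_ excludes inputs where a complete chunk is not int-parseable (there A raises ValueError, and B does too).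
import Mathlib
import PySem

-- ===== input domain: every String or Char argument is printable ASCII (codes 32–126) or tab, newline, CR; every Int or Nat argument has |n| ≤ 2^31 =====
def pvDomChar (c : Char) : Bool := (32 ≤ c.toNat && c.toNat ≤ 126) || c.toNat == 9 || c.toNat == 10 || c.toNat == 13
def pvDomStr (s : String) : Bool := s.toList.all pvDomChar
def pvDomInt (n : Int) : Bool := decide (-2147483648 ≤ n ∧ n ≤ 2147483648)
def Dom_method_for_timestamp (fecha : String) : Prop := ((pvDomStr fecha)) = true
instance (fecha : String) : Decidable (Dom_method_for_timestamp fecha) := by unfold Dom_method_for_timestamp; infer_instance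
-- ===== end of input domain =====

-- B replaces A's char-by-char accumulator state machine by a separator-filter pass plus
-- fixed-shape chunking (one 4-char field, then 2-char fields, trailing single char dropped); objective: simpler.


-- ===== PORT A =====
-- int(data_time) is PySem.Int.ofChars?; '.getD 0' is reached only outside Pre_ (where Python raises ValueError)
def pvStepA (st : List Char × List Int) (p : Int × Char) : List Char × List Int :=
  let data := p.2
  if data = '\t' ∨ data = '\r' ∨ data = '\x08' ∨ data = '\x0c' ∨ data = ' ' then st
  else if data ≠ '-' ∧ ¬(data = ':') then
    let dt := st.1 ++ [data]
    if dt.length = 4 then ([], st.2 ++ [(PySem.Int.ofChars? dt).getD 0])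
    else if dt.length = 2 ∧ st.2 ≠ [] then ([], st.2 ++ [(PySem.Int.ofChars? dt).getD 0])
    else (dt, st.2)
  else if data ≠ ':' ∧ ¬(data = '-') then
    let dt := st.1 ++ [data]
    if dt.length = 2 ∧ st.2 ≠ [] then ([], st.2 ++ [(PySem.Int.ofChars? dt).getD 0])
    else (dt, st.2)
  else st

def method_for_timestamp (fecha : String) : List Int :=
  ((PySem.List.enumerate fecha.toList).foldl pvStepA ([], [])).2

-- ===== PORT B =====
def pvKeep (c : Char) : Bool :=
  !(c = '\t' || c = '\r' || c = '\x08' || c = '\x0c' || c = ' ' || c = '-' || c = ':')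

-- the 'for i in range(4, len(kept)-1, 2)' loop: successive 2-char fields, trailing single dropped
def pvPairs : List Char → List Int
  | a :: b :: rest => (PySem.Int.ofChars? [a, b]).getD 0 :: pvPairs rest
  | _ => []

def method_for_timestamp_alt (fecha : String) : List Int :=
  let kept := fecha.toList.filter pvKeep
  if 4 ≤ kept.length then
    (PySem.Int.ofChars? (kept.take 4)).getD 0 :: pvPairs (kept.drop 4)
  else []

-- ===== PRECONDITION & SPEC =====
-- Pre_ excludes exactly the inputs where int() raises ValueError (in both A and B): some complete
-- chunk of the separator-stripped input — chars 0..3, or a pair starting at an even offset from 4 —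
-- is not int-parseable
def Pre_method_for_timestamp (fecha : String) : Prop :=
  let kept := fecha.toList.filter pvKeep
  (4 ≤ kept.length → (PySem.Int.ofChars? (kept.take 4)).isSome = true) ∧
  ∀ i ∈ List.range kept.length, 4 ≤ i ∧ (i - 4) % 2 = 0 ∧ i + 1 < kept.length →
    (PySem.Int.ofChars? [kept.getD i ' ', kept.getD (i + 1) ' ']).isSome = true
instance (fecha : String) : Decidable (Pre_method_for_timestamp fecha) := by
  unfold Pre_method_for_timestamp; infer_instance

def pvWitness_method_for_timestamp : String := "2021-01-02 12:30:45"

def Spec_method_for_timestamp (fecha : String) (out : List Int) : Prop := out = method_for_timestamp_alt fecha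
instance (fecha : String) (out : List Int) : Decidable (Spec_method_for_timestamp fecha out) := by unfold Spec_method_for_timestamp; infer_instance

-- ===== CLAIM (what is proved, stated in full; the proofs are below) =====
def Claim_equal_method_for_timestamp : Prop := ∀ (fecha : String), Dom_method_for_timestamp fecha → Pre_method_for_timestamp fecha → Spec_method_for_timestamp fecha (method_for_timestamp fecha)

-- ===== LEMMAS AND PROOFS =====

-- the kept-character body of A's loop, as a function of the char alone
def pvFlush (st : List Char × List Int) (data : Char) : List Char × List Int :=
  let dt := st.1 ++ [data]
  if dt.length = 4 then ([], st.2 ++ [(PySem.Int.ofChars? dt).getD 0])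
  else if dt.length = 2 ∧ st.2 ≠ [] then ([], st.2 ++ [(PySem.Int.ofChars? dt).getD 0])
  else (dt, st.2)

def pvStepChar (st : List Char × List Int) (c : Char) : List Char × List Int := pvStepA st (0, c)

lemma foldl_enumerate_eq (xs : List Char) : ∀ (s : Int) (st : List Char × List Int),
    (PySem.List.enumerate xs s).foldl pvStepA st = xs.foldl pvStepChar st := by
  induction xs with
  | nil => intro s st; simp [PySem.List.enumerate_nil]
  | cons c cs ih =>
    intro s st
    rw [PySem.List.enumerate_cons]
    simp only [List.foldl_cons, ih]
    rfl

lemma step_skip (st : List Char × List Int) (c : Char) (h : pvKeep c = false) :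
    pvStepChar st c = st := by
  simp only [pvKeep, Bool.not_eq_false', Bool.or_eq_true, decide_eq_true_eq] at h
  rcases h with ((((((h|h)|h)|h)|h)|h)|h) <;> subst h <;> rfl

lemma step_keep (st : List Char × List Int) (c : Char) (h : pvKeep c = true) :
    pvStepChar st c = pvFlush st c := by
  simp only [pvKeep, Bool.not_eq_true', Bool.or_eq_false_iff, decide_eq_false_iff_not] at h
  obtain ⟨⟨⟨⟨⟨⟨h1, h2⟩, h3⟩, h4⟩, h5⟩, h6⟩, h7⟩ := h
  simp [pvStepChar, pvStepA, pvFlush, h1, h2, h3, h4, h5, h6, h7]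

lemma foldl_filter_eq (cs : List Char) : ∀ (st : List Char × List Int),
    cs.foldl pvStepChar st = (cs.filter pvKeep).foldl pvFlush st := by
  induction cs with
  | nil => intro st; rfl
  | cons c cs ih =>
    intro st
    by_cases h : pvKeep c = true
    · simp [h, step_keep st c h, ih]
    · simp only [Bool.not_eq_true] at h
      simp [h, step_skip st c h, ih]

lemma phase2 (cs : List Char) : ∀ (buf : List Char) (acc : List Int),
    buf.length ≤ 1 → acc ≠ [] →
    (cs.foldl pvFlush (buf, acc)).2 = acc ++ pvPairs (buf ++ cs) := by
  induction cs with
  | nil =>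
    intro buf acc hb _
    match buf, hb with
    | [], _ => simp [pvPairs]
    | [a], _ => simp [pvPairs]
  | cons c cs ih =>
    intro buf acc hb hacc
    match buf, hb with
    | [], _ =>
      simp only [List.foldl_cons, pvFlush, List.nil_append]
      norm_num
      rw [ih [c] acc (by simp) hacc]
      simp
    | [a], _ =>
      simp only [List.foldl_cons, pvFlush]
      norm_num [hacc]
      rw [ih [] (acc ++ [(PySem.Int.ofChars? [a, c]).getD 0]) (by simp) (by simp)]
      simp [pvPairs]

lemma phase1 (cs : List Char) : ∀ (buf : List Char),
    buf.length ≤ 3 →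
    (cs.foldl pvFlush (buf, [])).2 =
      if 4 ≤ (buf ++ cs).length then
        (PySem.Int.ofChars? ((buf ++ cs).take 4)).getD 0 :: pvPairs ((buf ++ cs).drop 4)
      else [] := by
  induction cs with
  | nil =>
    intro buf hb
    simp only [List.foldl_nil]
    rw [if_neg (by simp; omega)]
  | cons c cs ih =>
    intro buf hb
    by_cases h4 : (buf ++ [c]).length = 4
    · simp only [List.foldl_cons, pvFlush, h4, if_true, List.nil_append]
      rw [phase2 cs [] [(PySem.Int.ofChars? (buf ++ [c])).getD 0] (by simp) (by simp)]
      have hlen : 4 ≤ (buf ++ c :: cs).length := by simp at h4 ⊢; omega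
      have heq : buf ++ c :: cs = (buf ++ [c]) ++ cs := by simp
      rw [if_pos hlen, heq, List.take_append_of_le_length (by omega),
          List.drop_append_of_le_length (by omega)]
      simp [List.take_of_length_le (le_of_eq h4), List.drop_of_length_le (le_of_eq h4)]
    · have h2 : ¬ ((buf ++ [c]).length = 2 ∧ ([] : List Int) ≠ []) := by simp
      simp only [List.foldl_cons, pvFlush, if_neg h4, if_neg h2]
      rw [ih (buf ++ [c]) (by simp at h4 ⊢; omega)]
      simp

-- ===== VERDICT (by name: the statement is the Claim_ definition above) =====
theorem method_for_timestamp_spec : Claim_equal_method_for_timestamp := by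
  intro fecha _ _
  unfold Spec_method_for_timestamp method_for_timestamp method_for_timestamp_alt
  rw [foldl_enumerate_eq, foldl_filter_eq, phase1 _ [] (by simp)]
  simp
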